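-- pv_equiv track=rewrite | github.com/tsinghua-fib-lab/City-Camera-Trajectory-Data | code/main/main.py | tms_adj_range
-- ===== SOURCE A (Python) =====
-- def tms_adj_range(tms, adj_range):
--     """
--     对于一个单点tm, 返回(tm-adj_range, tm+adj_range)作为其邻近时间范围
--     对于一个list tms, 返回每个单点tm邻近时间范围的并集
--     要求tms已排好序
--     """
--     tm = tms[0]
--     adj_ranges = [[max(tm - adj_range, 0), tm + adj_range]]
--     for tm in tms[1:]:
--         tm_m = tm - adj_range
--         tm_p = tm + adj_range
--         if tm_m <= adj_ranges[-1][1]: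
--             adj_ranges[-1][1] = tm_p
--         else:
--             adj_ranges.append([tm_m, tm_p])  # minus, plus
--     return adj_ranges
-- ===== SOURCE B (Python) =====
-- def tms_adj_range(tms, adj_range):
--     n = len(tms)
--     # pass 1: positions where consecutive times are too far apart to share an interval
--     breaks = [i for i in range(1, n) if tms[i] - tms[i - 1] > 2 * adj_range]
--     # pass 2: one interval per group of times delimited by those positions
--     starts = [0] + breaks
--     ends = breaks + [n]
--     res = [[tms[a] - adj_range, tms[b - 1] + adj_range] for a, b in zip(starts, ends)]
--     res[0][0] = max(tms[0] - adj_range, 0)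
--     return res
-- ===== Notes on version B (the rewrite author's own statement) =====
-- stated objective: alternative
-- what changed: B replaces A's incremental build that repeatedly mutates the last interval of the growing result by two staged passes: an index scan first computes the break positions where consecutive times are more than 2*adj_range apart, then a comprehension over the zipped group boundaries emits one interval per group, never revisiting an emitted interval.
import Mathlib
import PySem

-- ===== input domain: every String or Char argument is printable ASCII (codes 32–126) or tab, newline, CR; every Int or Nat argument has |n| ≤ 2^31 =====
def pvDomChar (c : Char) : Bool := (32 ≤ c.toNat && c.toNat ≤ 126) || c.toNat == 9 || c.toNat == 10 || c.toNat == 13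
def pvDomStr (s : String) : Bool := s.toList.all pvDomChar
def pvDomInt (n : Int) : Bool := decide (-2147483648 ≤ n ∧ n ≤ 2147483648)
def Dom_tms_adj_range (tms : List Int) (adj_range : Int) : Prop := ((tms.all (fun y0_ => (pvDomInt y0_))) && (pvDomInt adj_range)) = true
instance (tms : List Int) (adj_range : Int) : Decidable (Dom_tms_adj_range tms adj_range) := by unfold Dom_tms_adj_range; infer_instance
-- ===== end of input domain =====

-- B replaces A's incremental build that mutates the last interval of the growing result by two
-- staged passes (break positions, then one interval per group); same return value on every
-- non-empty tms (Pre_ excludes [], where A raises IndexError).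


-- ===== PORT A =====
-- literal port of A: seed with the clamped first interval, then fold over tms[1:],
-- either rewriting the last interval's right end (adj_ranges[-1][1] = tm_p, rendered as
-- dropLast ++ [rebuilt last]) or appending a fresh interval.  adj_ranges is never empty,
-- so the 'none' arm of getLast? is unreachable; the length-2 reads last[0]/last[1] use getD.
def tms_adj_range (tms : List Int) (adj_range : Int) : List (List Int) :=
  match tms with
  | [] => []   -- Python raises IndexError here (excluded by Pre_)
  | tm :: rest =>
    rest.foldl (fun adj_ranges tm =>
      let tm_m := tm - adj_range
      let tm_p := tm + adj_range
      match adj_ranges.getLast? with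
      | some last =>
        if tm_m ≤ last.getD 1 0 then
          adj_ranges.dropLast ++ [[last.getD 0 0, tm_p]]
        else
          adj_ranges ++ [[tm_m, tm_p]]
      | none => adj_ranges)   -- unreachable
      [[max (tm - adj_range) 0, tm + adj_range]]

-- ===== PORT B =====
-- literal port of B: pass 1 filters range(1, n) for the break positions; pass 2 maps one
-- interval over zip([0]+breaks, breaks+[n]); finally res[0][0] = max(tms[0]-adj_range, 0).
-- In-range indices are read with pyGetD (always in range here; Python raises only via tms[0]
-- on the empty list, excluded by Pre_, where this port's match returns the unclamped head).
def tms_adj_range_alt (tms : List Int) (adj_range : Int) : List (List Int) :=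
  let n : Int := tms.length
  let breaks := (PySem.List.pyRange 1 n 1).filter
    (fun i => decide (PySem.List.pyGetD tms i 0 - PySem.List.pyGetD tms (i - 1) 0 > 2 * adj_range))
  let starts := (0 : Int) :: breaks
  let ends := breaks ++ [n]
  let res := (starts.zip ends).map
    (fun ab => [PySem.List.pyGetD tms ab.1 0 - adj_range, PySem.List.pyGetD tms (ab.2 - 1) 0 + adj_range])
  match res with
  | [] => []   -- unreachable: res has one pair per group
  | h :: t => h.set 0 (max (PySem.List.pyGetD tms 0 0 - adj_range) 0) :: t

-- ===== PRECONDITION & SPEC =====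
-- A evaluates tms[0]: it raises IndexError exactly on the empty list (B does too).
def Pre_tms_adj_range (tms : List Int) (adj_range : Int) : Prop := tms ≠ []
instance (tms : List Int) (adj_range : Int) : Decidable (Pre_tms_adj_range tms adj_range) := by unfold Pre_tms_adj_range; infer_instance
def pvWitness_tms_adj_range : List Int × Int := ([0, 3, 20], 2)

def Spec_tms_adj_range (tms : List Int) (adj_range : Int) (out : List (List Int)) : Prop := out = tms_adj_range_alt tms adj_range
instance (tms : List Int) (adj_range : Int) (out : List (List Int)) : Decidable (Spec_tms_adj_range tms adj_range out) := by unfold Spec_tms_adj_range; infer_instance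

-- ===== CLAIM (what is proved, stated in full; the proofs are below) =====
def Claim_equal_tms_adj_range : Prop := ∀ (tms : List Int) (adj_range : Int), Dom_tms_adj_range tms adj_range → Pre_tms_adj_range tms adj_range → Spec_tms_adj_range tms adj_range (tms_adj_range tms adj_range)

-- ===== LEMMAS AND PROOFS =====

-- A's fold step, named for the proofs (definitionally the lambda in port A)
def stepA (r : Int) (adj_ranges : List (List Int)) (tm : Int) : List (List Int) :=
  let tm_m := tm - r
  let tm_p := tm + r
  match adj_ranges.getLast? with
  | some last =>
    if tm_m <= last.getD 1 0 then
      adj_ranges.dropLast ++ [[last.getD 0 0, tm_p]]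
    else
      adj_ranges ++ [[tm_m, tm_p]]
  | none => adj_ranges

-- common recursive description of both programs' results: one interval per group of
-- prev :: rest (groups split where the gap exceeds 2r), the first interval's left end
-- being literally s, each interval's right end = (last element of its group) + r.
def ivsS (r s prev : Int) : List Int → List (List Int)
  | [] => [[s, prev + r]]
  | t :: ts =>
    if t - r ≤ prev + r then ivsS r s t ts
    else [s, prev + r] :: ivsS r (t - r) t ts

-- B-side vocabulary: values-by-index function, break list, boundary pairs, interval of a pair,
-- and the "rewrite the last interval's end" operation.
def vOf (tms : List Int) (i : Int) : Int := PySem.List.pyGetD tms i 0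

def breaksOf (tms : List Int) (r : Int) : List Int :=
  (PySem.List.pyRange 1 (tms.length : Int) 1).filter
    (fun i => decide (vOf tms i - vOf tms (i - 1) > 2 * r))

def pairs (s : Int) : List Int → Int → List (Int × Int)
  | [], m => [(s, m)]
  | b :: bs, m => (s, b) :: pairs b bs m

def fIv (v : Int → Int) (r : Int) (p : Int × Int) : List Int := [v p.1 - r, v (p.2 - 1) + r]

def updEnd (l : List (List Int)) (e : Int) : List (List Int) :=
  l.dropLast ++ [[(l.getLastD []).getD 0 0, e]]

lemma foldA_eq (r : Int) : ∀ (rest : List Int) (acc : List (List Int)) (s prev : Int),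
    rest.foldl (stepA r) (acc ++ [[s, prev + r]]) = acc ++ ivsS r s prev rest := by
  intro rest
  induction rest with
  | nil => intro acc s prev; simp [ivsS]
  | cons t ts ih =>
    intro acc s prev
    rw [List.foldl_cons]
    by_cases h : t - r ≤ prev + r
    · have hs : stepA r (acc ++ [[s, prev + r]]) t = acc ++ [[s, t + r]] := by
        simp [stepA, List.getD, h]
      rw [hs, ih acc s t, ivsS, if_pos h]
    · have hs : stepA r (acc ++ [[s, prev + r]]) t
          = (acc ++ [[s, prev + r]]) ++ [[t - r, t + r]] := by
        simp [stepA, List.getD, h]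
      rw [hs, ih (acc ++ [[s, prev + r]]) (t - r) t, ivsS, if_neg h, List.append_assoc,
        List.singleton_append]

lemma ivsS_ne_nil (r s prev : Int) (ts : List Int) : ivsS r s prev ts ≠ [] := by
  induction ts generalizing s prev with
  | nil => simp [ivsS]
  | cons t ts ih =>
    rw [ivsS]
    split_ifs with h
    · exact ih _ _
    · simp

lemma ivsS_set (r v : Int) : ∀ (rest : List Int) (s prev : Int),
    (match ivsS r s prev rest with
     | [] => ([] : List (List Int))
     | h :: t => h.set 0 v :: t) = ivsS r v prev rest := by
  intro rest
  induction rest with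
  | nil => intro s prev; simp [ivsS]
  | cons t ts ih =>
    intro s prev
    by_cases h : t - r ≤ prev + r
    · rw [ivsS, if_pos h, ih s t, ivsS, if_pos h]
    · have h2 : ivsS r s prev (t :: ts) = [s, prev + r] :: ivsS r (t - r) t ts := by
        rw [ivsS, if_neg h]
      have h3 : ivsS r v prev (t :: ts) = [v, prev + r] :: ivsS r (t - r) t ts := by
        rw [ivsS, if_neg h]
      rw [h2, h3]
      rfl

lemma updEnd_cons (h : List Int) (l : List (List Int)) (e : Int) (hl : l ≠ []) :
    updEnd (h :: l) e = h :: updEnd l e := by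
  unfold updEnd
  rw [List.dropLast_cons_of_ne_nil hl, List.getLastD_cons]
  cases l with
  | nil => exact absurd rfl hl
  | cons a as =>
    rw [List.getLastD_eq_getLast?, List.getLastD_eq_getLast?,
      List.getLast?_eq_some_getLast (l := a :: as) (by simp)]
    simp

lemma ivsS_append (r : Int) : ∀ (ts : List Int) (s prev x : Int),
    ivsS r s prev (ts ++ [x]) =
      if x - r ≤ ts.getLastD prev + r then updEnd (ivsS r s prev ts) (x + r)
      else ivsS r s prev ts ++ [[x - r, x + r]] := by
  intro ts
  induction ts with
  | nil =>
    intro s prev x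
    simp only [List.nil_append, List.getLastD_nil]
    rw [ivsS]
    split_ifs with h
    · simp [ivsS, updEnd]; omega
    · simp [ivsS]; omega
  | cons t ts ih =>
    intro s prev x
    rw [List.cons_append, ivsS, List.getLastD_cons]
    by_cases h : t - r ≤ prev + r
    · rw [if_pos h, ih, ivsS, if_pos h]
    · rw [if_neg h, ih (t - r) t x]
      have hcons : ivsS r s prev (t :: ts) = [s, prev + r] :: ivsS r (t - r) t ts := by
        rw [ivsS, if_neg h]
      rw [hcons]
      split_ifs with hc
      · rw [updEnd_cons _ _ _ (ivsS_ne_nil r (t - r) t ts)]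
      · rfl

lemma zip_eq_pairs : ∀ (bs : List Int) (s m : Int), (s :: bs).zip (bs ++ [m]) = pairs s bs m := by
  intro bs
  induction bs with
  | nil => intro s m; simp [pairs]
  | cons b bs ih => intro s m; simp [pairs, ih b m]

lemma pairs_append : ∀ (bs : List Int) (s b' m : Int),
    pairs s (bs ++ [b']) m = pairs s bs b' ++ [(b', m)] := by
  intro bs
  induction bs with
  | nil => intro s b' m; simp [pairs]
  | cons b bs ih => intro s b' m; simp [pairs, ih b b' m]

lemma pairs_ne_nil (s : Int) (bs : List Int) (m : Int) : pairs s bs m ≠ [] := by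
  cases bs <;> simp [pairs]

lemma map_pairs_congr (v v' : Int → Int) (r m : Int)
    (hv : ∀ i : Int, 0 ≤ i → i < m → v' i = v i) :
    ∀ (bs : List Int) (s : Int), (∀ b ∈ bs, 1 ≤ b ∧ b < m) → 0 ≤ s → s < m →
      (pairs s bs m).map (fIv v' r) = (pairs s bs m).map (fIv v r) := by
  intro bs
  induction bs with
  | nil =>
    intro s _ hs0 hsm
    simp only [pairs, List.map_cons, List.map_nil, fIv]
    rw [hv s hs0 hsm, hv (m - 1) (by omega) (by omega)]
  | cons b bs ih =>
    intro s hbs hs0 hsm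
    have hb := hbs b (by simp)
    simp only [pairs, List.map_cons, fIv]
    rw [hv s hs0 hsm, hv (b - 1) (by omega) (by omega),
      ih b (fun c hc => hbs c (by simp [hc])) (by omega) hb.2]

lemma map_pairs_bump (v v' : Int → Int) (r m x : Int) (hm : 1 ≤ m)
    (hv : ∀ i : Int, 0 ≤ i → i < m → v' i = v i) (hx : v' m = x) :
    ∀ (bs : List Int) (s : Int), (∀ b ∈ bs, 1 ≤ b ∧ b < m) → 0 ≤ s → s < m →
      (pairs s bs (m + 1)).map (fIv v' r) = updEnd ((pairs s bs m).map (fIv v r)) (x + r) := by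
  intro bs
  induction bs with
  | nil =>
    intro s _ hs0 hsm
    simp only [pairs, List.map_cons, List.map_nil, fIv, updEnd]
    rw [hv s hs0 hsm]
    simp [show m + 1 - 1 = m by omega, hx]
  | cons b bs ih =>
    intro s hbs hs0 hsm
    have hb := hbs b (by simp)
    simp only [pairs, List.map_cons, fIv]
    rw [hv s hs0 hsm, hv (b - 1) (by omega) (by omega),
      ih b (fun c hc => hbs c (by simp [hc])) (by omega) hb.2,
      updEnd_cons _ _ _ (by simp [pairs_ne_nil])]

lemma vOf_append_lt (tms : List Int) (x : Int) (i : Int) (h0 : 0 ≤ i)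
    (hi : i < (tms.length : Int)) : vOf (tms ++ [x]) i = vOf tms i := by
  obtain ⟨k, rfl⟩ := Int.eq_ofNat_of_zero_le h0
  have hk : k < tms.length := by exact_mod_cast hi
  simp [vOf, PySem.List.pyGetD_natCast, List.getD_eq_getElem?_getD, List.getElem?_append_left hk]

lemma vOf_append_self (tms : List Int) (x : Int) :
    vOf (tms ++ [x]) (tms.length : Int) = x := by
  simp [vOf, PySem.List.pyGetD_natCast, List.getD_eq_getElem?_getD]

lemma vOf_last (tms : List Int) (h : tms ≠ []) :
    vOf tms ((tms.length : Int) - 1) = tms.getLastD 0 := by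
  have hl : 1 ≤ tms.length := List.length_pos_of_ne_nil h
  have : ((tms.length : Int) - 1) = ((tms.length - 1 : Nat) : Int) := by omega
  rw [this]
  simp [vOf, PySem.List.pyGetD_natCast, List.getLastD_eq_getLast?, List.getLast?_eq_getElem?,
    List.getD_eq_getElem?_getD]

lemma mem_breaksOf (tms : List Int) (r : Int) (b : Int) (hb : b ∈ breaksOf tms r) :
    1 ≤ b ∧ b < (tms.length : Int) := by
  have := List.mem_filter.mp hb
  exact (PySem.List.mem_pyRange_one.mp this.1)

lemma breaksOf_append (tms : List Int) (x r : Int) (h : tms ≠ []) :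
    breaksOf (tms ++ [x]) r =
      breaksOf tms r ++
        (if x - tms.getLastD 0 > 2 * r then [(tms.length : Int)] else []) := by
  have h1 : (1 : Int) ≤ (tms.length : Int) := by
    have := List.length_pos_of_ne_nil h; omega
  have hlen : (((tms ++ [x]).length : Nat) : Int) = (tms.length : Int) + 1 := by
    push_cast [List.length_append, List.length_singleton]; omega
  unfold breaksOf
  rw [hlen, PySem.List.pyRange_one_succ_right h1, List.filter_append]
  congr 1
  · apply List.filter_congr
    intro i hi
    have hb := PySem.List.mem_pyRange_one.mp hi
    rw [vOf_append_lt tms x i (by omega) (by omega),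
      vOf_append_lt tms x (i - 1) (by omega) (by omega)]
  · rw [List.filter_singleton, vOf_append_self tms x,
      vOf_append_lt tms x _ (by omega) (by omega), vOf_last tms h]
    simp

-- the main B-side characterisation: the mapped boundary pairs ARE the group intervals
lemma map_pairs_eq_ivsS (r : Int) : ∀ (ts : List Int) (first : Int),
    (pairs 0 (breaksOf (first :: ts) r) ((first :: ts).length : Int)).map
        (fIv (vOf (first :: ts)) r)
      = ivsS r (first - r) first ts := by
  intro ts first
  induction ts using List.reverseRecOn with
  | nil =>
    have hb : breaksOf [first] r = [] := by
      unfold breaksOf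
      simp [PySem.List.pyRange_one_eq_nil]
    rw [hb]
    show [fIv (vOf [first]) r (0, 1)] = [[first - r, first + r]]
    norm_num [fIv, vOf, PySem.List.pyGetD_ofNat']
  | append_singleton ts x ih =>
    have hne : (first :: ts) ≠ [] := by simp
    have hm1 : (1 : Int) ≤ ((first :: ts).length : Int) := by
      have := List.length_pos_of_ne_nil hne; omega
    have hT : first :: (ts ++ [x]) = (first :: ts) ++ [x] := by simp
    have hlen : ((((first :: ts) ++ [x]).length : Nat) : Int) = ((first :: ts).length : Int) + 1 := by
      push_cast [List.length_append, List.length_singleton]; omega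
    have hvlt : ∀ i : Int, 0 ≤ i → i < ((first :: ts).length : Int) →
        vOf ((first :: ts) ++ [x]) i = vOf (first :: ts) i :=
      fun i h0 hi => vOf_append_lt _ x i h0 hi
    have hbs : ∀ b ∈ breaksOf (first :: ts) r, 1 ≤ b ∧ b < ((first :: ts).length : Int) :=
      fun b hb => mem_breaksOf _ r b hb
    have hlast : (first :: ts).getLastD 0 = ts.getLastD first := List.getLastD_cons
    rw [hT, hlen, breaksOf_append (first :: ts) x r hne]
    by_cases hc : x - (first :: ts).getLastD 0 > 2 * r
    · rw [if_pos hc, pairs_append, List.map_append,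
        map_pairs_congr (vOf (first :: ts)) (vOf ((first :: ts) ++ [x])) r _ hvlt _ 0 hbs
          le_rfl (by omega),
        ih, ivsS_append]
      have hfx : fIv (vOf ((first :: ts) ++ [x])) r (((first :: ts).length : Int),
          ((first :: ts).length : Int) + 1) = [x - r, x + r] := by
        have e : ((first :: ts).length : Int) + 1 - 1 = ((first :: ts).length : Int) := by ring
        rw [fIv, e, vOf_append_self]
      rw [List.map_singleton, hfx, if_neg (by rw [← hlast]; omega)]
    · rw [if_neg hc, List.append_nil,
        map_pairs_bump (vOf (first :: ts)) (vOf ((first :: ts) ++ [x])) r _ x hm1 hvlt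
          (vOf_append_self _ x) _ 0 hbs le_rfl (by omega),
        ih, ivsS_append, if_pos (by rw [← hlast]; omega)]

-- ===== VERDICT (by name: the statement is the Claim_ definition above) =====
theorem tms_adj_range_spec : Claim_equal_tms_adj_range := by
  intro tms r _ hpre
  unfold Spec_tms_adj_range
  match tms with
  | [] => exact absurd rfl hpre
  | first :: rest =>
    have hA : tms_adj_range (first :: rest) r = ivsS r (max (first - r) 0) first rest := by
      have e : tms_adj_range (first :: rest) r
          = rest.foldl (stepA r) [[max (first - r) 0, first + r]] := rfl
      rw [e]
      simpa using foldA_eq r rest [] (max (first - r) 0) first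
    have hB : tms_adj_range_alt (first :: rest) r
        = (match ivsS r (first - r) first rest with
           | [] => ([] : List (List Int))
           | h :: t => h.set 0 (max (first - r) 0) :: t) := by
      have e : tms_adj_range_alt (first :: rest) r
          = (match (((0 : Int) :: breaksOf (first :: rest) r).zip
                (breaksOf (first :: rest) r ++ [((first :: rest).length : Int)])).map
                (fIv (vOf (first :: rest)) r) with
             | [] => ([] : List (List Int))
             | h :: t => h.set 0 (max (vOf (first :: rest) 0 - r) 0) :: t) := rfl
      rw [e, zip_eq_pairs, map_pairs_eq_ivsS]
      have : vOf (first :: rest) 0 = first := by simp [vOf, PySem.List.pyGetD_ofNat']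
      rw [this]
    rw [hA, hB, ivsS_set]
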